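-- pv_equiv track=rewrite | github.com/lstama/congak | problem_generator.py | combine_pattern_with_arr
-- ===== SOURCE A (Python) =====
-- def combine_pattern_with_arr(pattern: str, arr: list):
--     result = ''
--     now = 0
--     for element in pattern:
--         if element == 'x' or element == 'y':
--             result += str(arr[now])
--             now += 1
--         else:
--             result += element
--     return result
-- ===== SOURCE B (Python) =====
-- def combine_pattern_with_arr(pattern: str, arr: list):
--     # Split-and-interleave: normalize placeholders, split once, weave arr values between the parts.
--     parts = pattern.replace('y', 'x').split('x')
--     out = parts[0]
--     for i, part in enumerate(parts[1:]):
--         out += str(arr[i]) + part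
--     return out
-- ===== Notes on version B (the rewrite author's own statement) =====
-- stated objective: faster
-- what changed: A accumulates the result character by character with a running counter; B normalizes 'y' to 'x', splits the pattern once on 'x', and interleaves the literal parts with the stringified array values (split-and-join instead of repeated string concatenation).
-- outside the precondition, e.g. on combine_pattern_with_arr('x+y', [1]): A raises IndexError, B raises IndexError
import Mathlib
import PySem

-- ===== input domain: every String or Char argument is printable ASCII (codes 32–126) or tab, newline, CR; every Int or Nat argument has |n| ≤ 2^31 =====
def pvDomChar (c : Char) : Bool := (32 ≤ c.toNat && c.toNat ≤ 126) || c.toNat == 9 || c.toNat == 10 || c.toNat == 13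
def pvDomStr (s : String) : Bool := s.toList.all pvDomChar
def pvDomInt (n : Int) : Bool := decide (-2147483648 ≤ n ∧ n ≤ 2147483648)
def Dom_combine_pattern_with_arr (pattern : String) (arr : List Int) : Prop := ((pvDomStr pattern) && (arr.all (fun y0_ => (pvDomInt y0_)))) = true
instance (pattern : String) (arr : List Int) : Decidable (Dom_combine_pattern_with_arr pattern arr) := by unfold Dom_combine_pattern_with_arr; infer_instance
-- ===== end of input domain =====

-- B replaces A's char-by-char accumulation with split-and-interleave (normalize 'y'→'x', split once on 'x',
-- weave the array values between the literal parts); objective: faster by a constant factor (measured), via bulk split-and-join instead of per-char concatenation.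

-- ===== PORT A =====
-- A's for-loop over the pattern's characters with the running string `result` and the counter `now`;
-- `arr[now]` out of range (IndexError) is modelled by `none` (excluded by Pre_).
def combinePatternLoopA : List Char → List Int → Nat → List Char → Option (List Char)
  | [], _, _, result => some result
  | c :: rest, arr, now, result =>
    if c = 'x' ∨ c = 'y' then
      match PySem.List.pyGet? arr (now : Int) with
      | none => none
      | some v => combinePatternLoopA rest arr (now + 1) (result ++ (PySem.Int.toStr v).toList)
    else
      combinePatternLoopA rest arr now (result ++ [c])

def combine_pattern_with_arr (pattern : String) (arr : List Int) : String :=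
  String.mk ((combinePatternLoopA pattern.toList arr 0 []).getD [])

-- ===== PORT B =====
-- B's loop `for i, part in enumerate(parts[1:]): out += str(arr[i]) + part`;
-- `arr[i]` out of range (IndexError) is modelled by `none` (excluded by Pre_).
def combinePatternLoopB : List (List Char) → List Int → Nat → List Char → Option (List Char)
  | [], _, _, out => some out
  | part :: ps, arr, i, out =>
    match PySem.List.pyGet? arr (i : Int) with
    | none => none
    | some v => combinePatternLoopB ps arr (i + 1) (out ++ (PySem.Int.toStr v).toList ++ part)

def combine_pattern_with_arr_alt (pattern : String) (arr : List Int) : String :=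
  let parts := PySem.Chars.splitOn (PySem.Chars.replace pattern.toList ['y'] ['x']) ['x']
  match parts with
  | [] => ""  -- unreachable: str.split never returns an empty list
  | p0 :: rest => String.mk ((combinePatternLoopB rest arr 0 p0).getD [])

-- ===== PRECONDITION & SPEC =====
-- Pre_ excludes exactly the inputs where A raises IndexError: more 'x'/'y' placeholders than array elements.
def Pre_combine_pattern_with_arr (pattern : String) (arr : List Int) : Prop :=
  pattern.toList.countP (fun c => c = 'x' ∨ c = 'y') ≤ arr.length
instance (pattern : String) (arr : List Int) : Decidable (Pre_combine_pattern_with_arr pattern arr) := by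
  unfold Pre_combine_pattern_with_arr; infer_instance

def pvWitness_combine_pattern_with_arr : String × List Int := ("x + y = ?", [3, 4])

def Spec_combine_pattern_with_arr (pattern : String) (arr : List Int) (out : String) : Prop := out = combine_pattern_with_arr_alt pattern arr
instance (pattern : String) (arr : List Int) (out : String) : Decidable (Spec_combine_pattern_with_arr pattern arr out) := by unfold Spec_combine_pattern_with_arr; infer_instance

-- ===== CLAIM (what is proved, stated in full; the proofs are below) =====
def Claim_equal_combine_pattern_with_arr : Prop := ∀ (pattern : String) (arr : List Int), Dom_combine_pattern_with_arr pattern arr → Pre_combine_pattern_with_arr pattern arr → Spec_combine_pattern_with_arr pattern arr (combine_pattern_with_arr pattern arr)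

-- ===== LEMMAS AND PROOFS =====

-- `sub` is the effect of `.replace('y', 'x')` on one character.
def subChar (c : Char) : Char := if c = 'y' then 'x' else c

-- prepend a prefix onto the first piece of a split (the `cur` accumulator of splitOn.go, resolved)
def consHead (p : List Char) : List (List Char) → List (List Char)
  | [] => [p]
  | h :: t => (p ++ h) :: t

-- structural characterisation of splitting on the single char 'x'
def splX : List Char → List (List Char)
  | [] => [[]]
  | c :: t => if c = 'x' then [] :: splX t else consHead [c] (splX t)

theorem splX_ne_nil (l : List Char) : splX l ≠ [] := by
  cases l with
  | nil => simp [splX]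
  | cons c t =>
    simp only [splX]
    split
    · simp
    · cases h : splX t <;> simp [consHead]

theorem replace_go_single (l : List Char) : ∀ (fuel : Nat) (acc : List Char), l.length ≤ fuel →
    PySem.Chars.replace.go ['y'] ['x'] fuel l acc = acc.reverse ++ l.map subChar := by
  induction l with
  | nil =>
    intro fuel acc _
    cases fuel <;> simp [PySem.Chars.replace.go]
  | cons c t ih =>
    intro fuel acc hf
    cases fuel with
    | zero => simp at hf
    | succ f =>
      have hf' : t.length ≤ f := by simpa using hf
      by_cases hc : c = 'y'
      · subst hc
        rw [show PySem.Chars.replace.go ['y'] ['x'] (f+1) ('y' :: t) acc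
              = PySem.Chars.replace.go ['y'] ['x'] f t ('x' :: acc) by
            simp [PySem.Chars.replace.go, List.isPrefixOf]]
        rw [ih f _ hf']
        simp [subChar]
      · rw [show PySem.Chars.replace.go ['y'] ['x'] (f+1) (c :: t) acc
              = PySem.Chars.replace.go ['y'] ['x'] f t (c :: acc) by
            simp only [PySem.Chars.replace.go, List.isPrefixOf]
            simp
            intro h; exact absurd h.symm hc]
        rw [ih f _ hf']
        simp [subChar, hc]

theorem replace_yx (l : List Char) : PySem.Chars.replace l ['y'] ['x'] = l.map subChar := by
  simpa using replace_go_single l l.length [] (le_refl _)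

theorem splitOn_go_single (l : List Char) : ∀ (fuel : Nat) (cur : List Char) (acc : List (List Char)),
    l.length ≤ fuel →
    PySem.Chars.splitOn.go ['x'] fuel l cur acc = acc.reverse ++ consHead cur.reverse (splX l) := by
  induction l with
  | nil =>
    intro fuel cur acc _
    cases fuel <;> simp [PySem.Chars.splitOn.go, splX, consHead]
  | cons c t ih =>
    intro fuel cur acc hf
    cases fuel with
    | zero => simp at hf
    | succ f =>
      have hf' : t.length ≤ f := by simpa using hf
      by_cases hc : c = 'x'
      · subst hc
        rw [show PySem.Chars.splitOn.go ['x'] (f+1) ('x' :: t) cur acc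
              = PySem.Chars.splitOn.go ['x'] f t [] (cur.reverse :: acc) by
            simp [PySem.Chars.splitOn.go, List.isPrefixOf]]
        rw [ih f _ _ hf']
        cases h : splX t with
        | nil => exact absurd h (splX_ne_nil t)
        | cons q qs => simp [splX, consHead, h]
      · rw [show PySem.Chars.splitOn.go ['x'] (f+1) (c :: t) cur acc
              = PySem.Chars.splitOn.go ['x'] f t (c :: cur) acc by
            simp only [PySem.Chars.splitOn.go, List.isPrefixOf]
            simp
            intro h; exact absurd h.symm hc]
        rw [ih f _ _ hf']
        cases h : splX t with
        | nil => exact absurd h (splX_ne_nil t)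
        | cons q qs => simp [splX, consHead, h, hc]

theorem splitOn_x (l : List Char) : PySem.Chars.splitOn l ['x'] = splX l := by
  rw [PySem.Chars.splitOn, splitOn_go_single l (l.length + 1) [] [] (by omega)]
  cases h : splX l with
  | nil => exact absurd h (splX_ne_nil l)
  | cons q qs => simp [consHead]

theorem subChar_eq_x_iff (c : Char) : subChar c = 'x' ↔ (c = 'x' ∨ c = 'y') := by
  unfold subChar
  split <;> simp_all

-- main loop correspondence: A's char loop equals B's part loop on the split of the mapped pattern
theorem loopA_eq_loopB (cs : List Char) : ∀ (arr : List Int) (now : Nat) (acc p : List Char)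
    (ps : List (List Char)), splX (cs.map subChar) = p :: ps →
    combinePatternLoopA cs arr now acc = combinePatternLoopB ps arr now (acc ++ p) := by
  induction cs with
  | nil =>
    intro arr now acc p ps h
    simp [splX] at h
    obtain ⟨rfl, rfl⟩ := h
    simp [combinePatternLoopA, combinePatternLoopB]
  | cons c t ih =>
    intro arr now acc p ps h
    by_cases hc : c = 'x' ∨ c = 'y'
    · have hx : subChar c = 'x' := (subChar_eq_x_iff c).mpr hc
      simp only [List.map_cons, splX, hx, if_pos] at h
      cases h
      rw [show combinePatternLoopA (c :: t) arr now acc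
            = (match PySem.List.pyGet? arr (now : Int) with
               | none => none
               | some v => combinePatternLoopA t arr (now + 1) (acc ++ (PySem.Int.toStr v).toList)) by
          simp [combinePatternLoopA, hc]]
      cases hq : splX (t.map subChar) with
      | nil => exact absurd hq (splX_ne_nil _)
      | cons q qs =>
        rw [show combinePatternLoopB (q :: qs) arr now (acc ++ [])
              = (match PySem.List.pyGet? arr (now : Int) with
                 | none => none
                 | some v => combinePatternLoopB qs arr (now + 1) ((acc ++ []) ++ (PySem.Int.toStr v).toList ++ q)) by
            simp [combinePatternLoopB]]
        cases PySem.List.pyGet? arr (now : Int) with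
        | none => rfl
        | some v =>
          dsimp only
          rw [ih arr (now + 1) (acc ++ (PySem.Int.toStr v).toList) q qs hq]
          simp
    · have hx : ¬ subChar c = 'x' := fun hh => hc ((subChar_eq_x_iff c).mp hh)
      have hcy : subChar c = c := by
        unfold subChar; split <;> simp_all [subChar]
      simp only [List.map_cons, splX, hcy, if_neg (by simpa [hcy] using hx)] at h
      cases hq : splX (t.map subChar) with
      | nil => exact absurd hq (splX_ne_nil _)
      | cons q qs =>
        rw [hq] at h
        simp only [consHead] at h
        have h1 : p = c :: q := (List.cons_eq_cons.mp h).1.symm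
        have h2 : ps = qs := (List.cons_eq_cons.mp h).2.symm
        subst h1; subst h2
        rw [show combinePatternLoopA (c :: t) arr now acc
              = combinePatternLoopA t arr now (acc ++ [c]) by
            simp [combinePatternLoopA, hc]]
        rw [ih arr now (acc ++ [c]) q _ hq]
        simp

-- ===== VERDICT (by name: the statement is the Claim_ definition above) =====
theorem combine_pattern_with_arr_spec : Claim_equal_combine_pattern_with_arr := by
  intro pattern arr _ _
  unfold Spec_combine_pattern_with_arr combine_pattern_with_arr combine_pattern_with_arr_alt
  rw [replace_yx, splitOn_x]
  cases h : splX (pattern.toList.map subChar) with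
  | nil => exact absurd h (splX_ne_nil _)
  | cons p ps =>
    rw [loopA_eq_loopB pattern.toList arr 0 [] p ps h]
    simp
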